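-- pv_equiv track=rewrite | github.com/areebbeigh/profanityfilter | profanityfilter/profanityfilter.py | _merge_by_language
-- ===== SOURCE A (Python) =====
-- def _merge_by_language(parts):
--     result = []
--     language = parts[0][0]
--     merged = parts[0][1]
--     i = 1
--     while i < len(parts):
--         if parts[i][0] != language:
--             result.append((language, merged))
--             language = parts[i][0]
--             merged = parts[i][1]
--         else:
--             merged += parts[i][1]
--         i += 1
--     result.append((language, merged))
--     return result
-- ===== SOURCE B (Python) =====
-- def _merge_by_language(parts):
--     if not parts:
--         return []
--     lang = parts[0][0]
--     k = 1
--     while k < len(parts) and parts[k][0] == lang: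
--         k += 1
--     merged = parts[0][1] + "".join(p[1] for p in parts[1:k])
--     return [(lang, merged)] + _merge_by_language(parts[k:])
-- ===== Notes on version B (the rewrite author's own statement) =====
-- stated objective: alternative
-- what changed: A does one pass with a pending (language, merged) accumulator flushed on each language change; B recursively splits the list into maximal runs of equal language (takeWhile/dropWhile-style scan) and joins each run's payloads, emitting one pair per run.
import Mathlib
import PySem

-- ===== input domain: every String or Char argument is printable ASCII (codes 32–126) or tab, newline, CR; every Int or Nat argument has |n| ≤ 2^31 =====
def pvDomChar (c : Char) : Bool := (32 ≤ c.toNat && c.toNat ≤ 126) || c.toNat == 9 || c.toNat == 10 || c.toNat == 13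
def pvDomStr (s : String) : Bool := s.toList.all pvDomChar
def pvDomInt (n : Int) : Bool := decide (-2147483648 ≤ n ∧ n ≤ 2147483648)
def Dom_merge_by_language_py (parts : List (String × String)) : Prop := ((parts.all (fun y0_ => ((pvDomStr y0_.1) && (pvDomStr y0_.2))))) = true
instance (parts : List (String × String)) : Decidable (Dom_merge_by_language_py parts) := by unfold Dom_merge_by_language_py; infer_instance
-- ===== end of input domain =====

-- B merges consecutive equal-language parts by recursing over maximal runs instead of A's
-- single accumulator loop; return value only, no mutation in either program.

-- ===== PORT A =====
-- the body of A's while loop: flush (language, merged) on a language change, else extend merged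
def mblStepA (st : List (String × String) × String × String) (p : String × String) :
    List (String × String) × String × String :=
  if p.1 != st.2.1 then (st.1 ++ [(st.2.1, st.2.2)], p.1, p.2)
  else (st.1, st.2.1, st.2.2 ++ p.2)

def merge_by_language_py (parts : List (String × String)) : List (String × String) :=
  match parts with
  | [] => []  -- unreachable under Pre_: Python raises IndexError on parts[0]
  | (l0, m0) :: rest =>
    let s := rest.foldl mblStepA ([], l0, m0)
    s.1 ++ [(s.2.1, s.2.2)]

-- ===== PORT B =====
-- Source B's run recursion; the fuel argument (seeded with the length) only makes the
-- recursion structural, it never cuts the computation short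
def mblAltGo (fuel : Nat) (parts : List (String × String)) : List (String × String) :=
  match fuel, parts with
  | _, [] => []
  | 0, _ => []  -- unreachable: fuel starts at parts.length and dropWhile never grows a list
  | fuel + 1, (lang, pay) :: rest =>
    -- the maximal run sharing lang (Python: the `while k < len(parts) and parts[k][0] == lang` scan)
    let run := rest.takeWhile (fun p => p.1 == lang)
    let rest' := rest.dropWhile (fun p => p.1 == lang)
    (lang, pay ++ PySem.Str.join "" (run.map Prod.snd)) :: mblAltGo fuel rest'

def merge_by_language_py_alt (parts : List (String × String)) : List (String × String) :=
  mblAltGo parts.length parts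

-- ===== PRECONDITION & SPEC =====
-- Pre_ excludes only the empty list, on which Python A raises IndexError.
def Pre_merge_by_language_py (parts : List (String × String)) : Prop := parts ≠ []
instance (parts : List (String × String)) : Decidable (Pre_merge_by_language_py parts) := by
  unfold Pre_merge_by_language_py; infer_instance

def pvWitness_merge_by_language_py : (List (String × String)) := [("en", "hi")]

def Spec_merge_by_language_py (parts : List (String × String)) (out : List (String × String)) : Prop :=
  out = merge_by_language_py_alt parts
instance (parts : List (String × String)) (out : List (String × String)) :
    Decidable (Spec_merge_by_language_py parts out) := by
  unfold Spec_merge_by_language_py; infer_instance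

-- ===== CLAIM (what is proved, stated in full; the proofs are below) =====
def Claim_equal_merge_by_language_py : Prop := ∀ (parts : List (String × String)),
  Dom_merge_by_language_py parts → Pre_merge_by_language_py parts →
  Spec_merge_by_language_py parts (merge_by_language_py parts)

-- ===== LEMMAS AND PROOFS =====

lemma mbl_join_empty_cons (m : String) (l : List String) :
    PySem.Str.join "" (m :: l) = m ++ PySem.Str.join "" l := by
  cases l with
  | nil => simp [PySem.Str.join, PySem.Chars.join, List.intercalate]
  | cons x xs => simp [PySem.Str.join, PySem.Chars.join, List.intercalate]

lemma mbl_join_empty_nil : PySem.Str.join "" ([] : List String) = "" := by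
  simp [PySem.Str.join, PySem.Chars.join, List.intercalate]

lemma mblAltGo_nil (fuel : Nat) : mblAltGo fuel [] = [] := by
  cases fuel <;> rfl

-- any fuel at least the length computes B's recursion
lemma mblAltGo_eq_alt : ∀ (fuel : Nat) (l : List (String × String)), l.length ≤ fuel →
    mblAltGo fuel l = merge_by_language_py_alt l := by
  intro fuel
  induction fuel using Nat.strong_induction_on with
  | _ fuel ih =>
    intro l hl
    match fuel, l with
    | _, [] => rw [mblAltGo_nil]; rfl
    | 0, p :: rest => simp at hl
    | fuel + 1, (lang, pay) :: rest =>
      have hle : (rest.dropWhile (fun p => p.1 == lang)).length ≤ rest.length :=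
        List.length_dropWhile_le _ _
      simp only [List.length_cons, Nat.add_le_add_iff_right] at hl
      show _ :: mblAltGo fuel _ = merge_by_language_py_alt _
      rw [ih fuel (Nat.lt_succ_self _) _ (le_trans hle hl)]
      show _ = mblAltGo (rest.length + 1) _
      rw [show mblAltGo (rest.length + 1) ((lang, pay) :: rest) =
            (lang, pay ++ PySem.Str.join ""
              ((rest.takeWhile (fun p => p.1 == lang)).map Prod.snd)) ::
            mblAltGo rest.length (rest.dropWhile (fun p => p.1 == lang)) from rfl]
      rw [ih rest.length (Nat.lt_succ_of_le hl) _ hle]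

-- B's unfolding on a nonempty list
lemma mbl_alt_cons (lang pay : String) (rest : List (String × String)) :
    merge_by_language_py_alt ((lang, pay) :: rest) =
      (lang, pay ++ PySem.Str.join ""
        ((rest.takeWhile (fun p => p.1 == lang)).map Prod.snd)) ::
      merge_by_language_py_alt (rest.dropWhile (fun p => p.1 == lang)) := by
  show mblAltGo (rest.length + 1) _ = _
  rw [show mblAltGo (rest.length + 1) ((lang, pay) :: rest) =
        (lang, pay ++ PySem.Str.join ""
          ((rest.takeWhile (fun p => p.1 == lang)).map Prod.snd)) ::
        mblAltGo rest.length (rest.dropWhile (fun p => p.1 == lang)) from rfl]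
  rw [mblAltGo_eq_alt rest.length _ (List.length_dropWhile_le _ _)]

-- the loop invariant: running A's loop from state (acc, l0, m0) and flushing at the end
-- yields acc followed by B's run decomposition of (l0, m0) :: rest
lemma mbl_loop_eq (rest : List (String × String)) :
    ∀ (acc : List (String × String)) (l0 m0 : String),
      (let s := rest.foldl mblStepA (acc, l0, m0); s.1 ++ [(s.2.1, s.2.2)]) =
        acc ++ merge_by_language_py_alt ((l0, m0) :: rest) := by
  induction rest with
  | nil =>
    intro acc l0 m0
    simp [merge_by_language_py_alt, mblAltGo, mbl_join_empty_nil]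
  | cons p rest' ih =>
    intro acc l0 m0
    obtain ⟨l1, m1⟩ := p
    by_cases h : l1 = l0
    · subst h
      simp only [List.foldl_cons, mblStepA, bne_self_eq_false, Bool.false_eq_true, if_false]
      rw [ih acc l1 (m0 ++ m1), mbl_alt_cons, mbl_alt_cons]
      have hb : (l1 == l1) = true := by simp
      simp [List.takeWhile, List.dropWhile, mbl_join_empty_cons, String.append_assoc]
    · have hb : (l1 != l0) = true := by simp [bne, h]
      have hb' : (l1 == l0) = false := by simp [h]
      simp only [List.foldl_cons, mblStepA, hb, if_true]
      rw [ih (acc ++ [(l0, m0)]) l1 m1, mbl_alt_cons (lang := l0)]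
      simp [List.takeWhile, List.dropWhile, hb', mbl_join_empty_nil]

-- ===== VERDICT (by name: the statement is the Claim_ definition above) =====
theorem merge_by_language_py_spec : Claim_equal_merge_by_language_py := by
  intro parts _ hpre
  unfold Spec_merge_by_language_py
  match parts with
  | [] => exact absurd rfl hpre
  | (l0, m0) :: rest =>
    show (let s := rest.foldl mblStepA ([], l0, m0); s.1 ++ [(s.2.1, s.2.2)]) = _
    rw [mbl_loop_eq rest [] l0 m0]
    simp
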